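-- pv_equiv track=rewrite | github.com/YasminAkaichi/bach4popper | aggstrategy.py | aggregate_outcomes
-- ===== SOURCE A (Python) =====
-- AGG_TABLE_POS = {
--     ("all","all"): "all",
--     ("all","some"): "some",
--     ("all","none"): "some",
--     ("some","some"): "some",
--     ("some","none"): "some",
--     ("none","none"): "none",
-- }
--
-- AGG_TABLE_NEG = {
--     ("some","some"): "some",
--     ("some","none"): "some",
--     ("none","some"): "some",
--     ("none","none"): "none",
-- }
--
-- def aggregate_outcomes(outcomes):
--     """
--     outcomes: list of tuples ('all'/'some'/'none', 'all'/'some'/'none')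
--     Returns aggregated (E+, E-)
--     """
--
--     if len(outcomes) == 0:
--         return ("none","none")
--
--     Eplus, Eminus = outcomes[0]
--
--     for (ep, em) in outcomes[1:]:
--         # positive
--         Eplus = AGG_TABLE_POS.get((Eplus, ep), Eplus)
--         # negative
--         Eminus = AGG_TABLE_NEG.get((Eminus, em), Eminus)
--
--     return (Eplus, Eminus)
-- ===== SOURCE B (Python) =====
-- def aggregate_outcomes(outcomes):
--     """
--     outcomes: list of tuples ('all'/'some'/'none', 'all'/'some'/'none')
--     Returns aggregated (E+, E-)
--     """
--     if not outcomes: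
--         return ("none", "none")
--     p0, n0 = outcomes[0]
--     if p0 == "all":
--         eplus = "some" if any(p in ("some", "none") for p, _ in outcomes[1:]) else "all"
--     else:
--         eplus = p0
--     if n0 == "none":
--         eminus = "some" if any(n == "some" for _, n in outcomes[1:]) else "none"
--     else:
--         eminus = n0
--     return (eplus, eminus)
-- ===== Notes on version B (the rewrite author's own statement) =====
-- stated objective: simpler
-- what changed: Replaces the stateful table-lookup fold over the whole list with two independent one-shot computations: each component is determined by the first element and a single any() over the rest (only an 'all' positive / 'none' negative first state can ever change), eliminating the lookup tables entirely.
import Mathlib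
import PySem

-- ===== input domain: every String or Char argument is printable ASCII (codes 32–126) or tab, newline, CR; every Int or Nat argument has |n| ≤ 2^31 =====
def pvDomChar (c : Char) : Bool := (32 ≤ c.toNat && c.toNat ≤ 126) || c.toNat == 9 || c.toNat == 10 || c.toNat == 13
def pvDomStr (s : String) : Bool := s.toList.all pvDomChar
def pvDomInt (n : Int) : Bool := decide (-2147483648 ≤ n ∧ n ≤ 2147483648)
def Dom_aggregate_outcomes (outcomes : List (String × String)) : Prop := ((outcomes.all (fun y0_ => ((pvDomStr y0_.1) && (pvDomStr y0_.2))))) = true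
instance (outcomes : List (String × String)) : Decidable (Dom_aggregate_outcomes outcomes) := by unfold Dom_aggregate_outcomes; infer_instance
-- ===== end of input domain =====

-- B replaces A's table-driven stateful fold by two independent first-element + any() computations (simpler, same cost).

-- ===== PORT A =====
def AGG_TABLE_POS : PySem.Dict (String × String) String :=
  PySem.Dict.ofList [(("all","all"), "all"), (("all","some"), "some"), (("all","none"), "some"),
    (("some","some"), "some"), (("some","none"), "some"), (("none","none"), "none")]

def AGG_TABLE_NEG : PySem.Dict (String × String) String :=
  PySem.Dict.ofList [(("some","some"), "some"), (("some","none"), "some"),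
    (("none","some"), "some"), (("none","none"), "none")]

def aggregate_outcomes (outcomes : List (String × String)) : String × String :=
  if outcomes.length = 0 then ("none","none")
  else
    let s0 := PySem.List.pyGetD outcomes 0 ("","")
    let rest := PySem.List.slice outcomes (some 1) none
    rest.foldl (fun (st : String × String) (p : String × String) =>
      (AGG_TABLE_POS.getD (st.1, p.1) st.1, AGG_TABLE_NEG.getD (st.2, p.2) st.2)) s0

-- ===== PORT B =====
def aggregate_outcomes_alt (outcomes : List (String × String)) : String × String :=
  match outcomes with
  | [] => ("none","none")
  | (p0, n0) :: rest =>
    let eplus := if p0 = "all" then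
        (if rest.any (fun p => p.1 == "some" || p.1 == "none") then "some" else "all")
      else p0
    let eminus := if n0 = "none" then
        (if rest.any (fun p => p.2 == "some") then "some" else "none")
      else n0
    (eplus, eminus)

-- ===== PRECONDITION & SPEC =====
def Spec_aggregate_outcomes (outcomes : List (String × String)) (out : String × String) : Prop := out = aggregate_outcomes_alt outcomes
instance (outcomes : List (String × String)) (out : String × String) : Decidable (Spec_aggregate_outcomes outcomes out) := by unfold Spec_aggregate_outcomes; infer_instance

-- ===== CLAIM (what is proved, stated in full; the proofs are below) =====
def Claim_equal_aggregate_outcomes : Prop := ∀ (outcomes : List (String × String)), Dom_aggregate_outcomes outcomes → Spec_aggregate_outcomes outcomes (aggregate_outcomes outcomes)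

-- ===== LEMMAS AND PROOFS =====

-- One step of A's positive/negative update
def stepPos (s ep : String) : String := AGG_TABLE_POS.getD (s, ep) s
def stepNeg (s em : String) : String := AGG_TABLE_NEG.getD (s, em) s

lemma posTable_eq : AGG_TABLE_POS = PySem.Dict.mk
    [(("all","all"), "all"), (("all","some"), "some"), (("all","none"), "some"),
     (("some","some"), "some"), (("some","none"), "some"), (("none","none"), "none")] := by decide

lemma negTable_eq : AGG_TABLE_NEG = PySem.Dict.mk
    [(("some","some"), "some"), (("some","none"), "some"),
     (("none","some"), "some"), (("none","none"), "none")] := by decide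

lemma stepPos_ne_all (s ep : String) (h : s ≠ "all") : stepPos s ep = s := by
  by_cases hs : s = "some"
  · subst hs
    by_cases h1 : ep = "some"
    · subst h1; decide
    · by_cases h2 : ep = "none"
      · subst h2; decide
      · simp_all [stepPos, posTable_eq, PySem.Dict.getD_eq_get?_getD, PySem.Dict.get?,
          List.find?, BEq.beq, eq_comm]
  · by_cases hn : s = "none"
    · subst hn
      by_cases h2 : ep = "none"
      · subst h2; decide
      · simp_all [stepPos, posTable_eq, PySem.Dict.getD_eq_get?_getD, PySem.Dict.get?,
          List.find?, BEq.beq, eq_comm]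
    · simp_all [stepPos, posTable_eq, PySem.Dict.getD_eq_get?_getD, PySem.Dict.get?,
        List.find?, BEq.beq, eq_comm]

lemma stepPos_all (ep : String) :
    stepPos "all" ep = (if ep == "some" || ep == "none" then "some" else "all") := by
  by_cases h1 : ep = "all"
  · subst h1; decide
  · by_cases h2 : ep = "some"
    · subst h2; decide
    · by_cases h3 : ep = "none"
      · subst h3; decide
      · simp_all [stepPos, posTable_eq, PySem.Dict.getD_eq_get?_getD, PySem.Dict.get?,
          List.find?, BEq.beq, eq_comm]

lemma stepNeg_ne_none (s em : String) (h : s ≠ "none") : stepNeg s em = s := by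
  by_cases hs : s = "some"
  · subst hs
    by_cases h1 : em = "some"
    · subst h1; decide
    · by_cases h2 : em = "none"
      · subst h2; decide
      · simp_all [stepNeg, negTable_eq, PySem.Dict.getD_eq_get?_getD, PySem.Dict.get?,
          List.find?, BEq.beq, eq_comm]
  · simp_all [stepNeg, negTable_eq, PySem.Dict.getD_eq_get?_getD, PySem.Dict.get?,
      List.find?, BEq.beq, eq_comm]

lemma stepNeg_none (em : String) :
    stepNeg "none" em = (if em == "some" then "some" else "none") := by
  by_cases h1 : em = "some"
  · subst h1; decide
  · by_cases h2 : em = "none"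
    · subst h2; decide
    · simp_all [stepNeg, negTable_eq, PySem.Dict.getD_eq_get?_getD, PySem.Dict.get?,
        List.find?, BEq.beq, eq_comm]

-- A's fold over the pair splits into two independent folds
lemma fold_split (rest : List (String × String)) (s : String × String) :
    rest.foldl (fun (st : String × String) (p : String × String) =>
      (stepPos st.1 p.1, stepNeg st.2 p.2)) s =
    (rest.foldl (fun a p => stepPos a p.1) s.1, rest.foldl (fun a p => stepNeg a p.2) s.2) := by
  induction rest generalizing s with
  | nil => rfl
  | cons x xs ih => simp [List.foldl, ih]

lemma foldPos_ne_all (rest : List (String × String)) (s : String) (h : s ≠ "all") :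
    rest.foldl (fun a p => stepPos a p.1) s = s := by
  induction rest with
  | nil => rfl
  | cons x xs ih => simpa [List.foldl, stepPos_ne_all s x.1 h] using ih

lemma foldPos_all (rest : List (String × String)) :
    rest.foldl (fun a p => stepPos a p.1) "all" =
      (if rest.any (fun p => p.1 == "some" || p.1 == "none") then "some" else "all") := by
  induction rest with
  | nil => rfl
  | cons x xs ih =>
    by_cases h : x.1 = "some" ∨ x.1 = "none"
    · have hs : stepPos "all" x.1 = "some" := by
        rw [stepPos_all]; rcases h with h | h <;> simp [h]
      rw [List.foldl_cons, hs, foldPos_ne_all xs "some" (by decide), List.any_cons]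
      rcases h with h | h <;> simp [h]
    · have hs : stepPos "all" x.1 = "all" := by
        rw [stepPos_all]
        simp only [not_or] at h
        simp [h.1, h.2]
      rw [List.foldl_cons, hs, ih, List.any_cons]
      simp only [not_or] at h
      have h1 : (x.1 == "some") = false := by simp [h.1]
      have h2 : (x.1 == "none") = false := by simp [h.2]
      rw [h1, h2, Bool.false_or, Bool.false_or]

lemma foldNeg_ne_none (rest : List (String × String)) (s : String) (h : s ≠ "none") :
    rest.foldl (fun a p => stepNeg a p.2) s = s := by
  induction rest with
  | nil => rfl
  | cons x xs ih => simpa [List.foldl, stepNeg_ne_none s x.2 h] using ih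

lemma foldNeg_none (rest : List (String × String)) :
    rest.foldl (fun a p => stepNeg a p.2) "none" =
      (if rest.any (fun p => p.2 == "some") then "some" else "none") := by
  induction rest with
  | nil => rfl
  | cons x xs ih =>
    rw [List.foldl_cons, stepNeg_none, List.any_cons]
    by_cases h : x.2 = "some"
    · simp [h, foldNeg_ne_none xs "some" (by decide)]
    · have h1 : (x.2 == "some") = false := by simp [h]
      rw [h1, Bool.false_or, if_neg (by simp), ih]

lemma agg_eq (outcomes : List (String × String)) :
    aggregate_outcomes outcomes = aggregate_outcomes_alt outcomes := by
  match outcomes with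
  | [] => rfl
  | (p0, n0) :: rest =>
    unfold aggregate_outcomes
    simp only [List.length_cons, Nat.succ_ne_zero,
      PySem.List.pyGetD_zero_cons, PySem.List.slice_from_one, List.tail_cons]
    have hfun : (fun (st : String × String) (p : String × String) =>
        (AGG_TABLE_POS.getD (st.1, p.1) st.1, AGG_TABLE_NEG.getD (st.2, p.2) st.2)) =
        (fun st p => (stepPos st.1 p.1, stepNeg st.2 p.2)) := rfl
    rw [hfun, fold_split]
    show (_, _) = aggregate_outcomes_alt ((p0, n0) :: rest)
    unfold aggregate_outcomes_alt
    by_cases hp : p0 = "all" <;> by_cases hn : n0 = "none"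
    · subst hp; subst hn
      simp [foldPos_all, foldNeg_none]
    · subst hp
      simp [foldPos_all, foldNeg_ne_none rest n0 hn, hn]
    · subst hn
      simp [foldPos_ne_all rest p0 hp, foldNeg_none, hp]
    · simp [foldPos_ne_all rest p0 hp, foldNeg_ne_none rest n0 hn, hp, hn]

-- ===== VERDICT (by name: the statement is the Claim_ definition above) =====
theorem aggregate_outcomes_spec : Claim_equal_aggregate_outcomes := by
  intro outcomes _
  exact agg_eq outcomes
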